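-- pv_equiv track=rewrite | github.com/d1zm4as/CodeWars | Python/6 Kyu/length_of_missing_array.py | get_length_of_missing_array
-- ===== SOURCE A (Python) =====
-- def get_length_of_missing_array(arr):
--     if not arr:
--         return 0
--     lista = []
--     for x in arr:
--         if not x:
--             return 0
--         else:
--             lista.append(len(x))
--     maior  = max(lista)
--     menor  = min(lista)
--
--     arr = sum(list(range(menor,maior+1)))
--     return arr-sum(lista)
-- ===== SOURCE B (Python) =====
-- def get_length_of_missing_array(arr):
--     if not arr or any(not x for x in arr):
--         return 0
--     lo = hi = len(arr[0])
--     total = 0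
--     for x in arr:
--         n = len(x)
--         if n < lo:
--             lo = n
--         if n > hi:
--             hi = n
--         total += n
--     return (lo + hi) * (hi - lo + 1) // 2 - total
-- ===== Notes on version B (the rewrite author's own statement) =====
-- stated objective: alternative
-- what changed: One pass keeps running min/max/sum of the lengths and the range-sum is replaced by the Gauss closed-form formula, instead of building a lengths list, scanning it three times (max, min, sum) and materialising and summing range(min, max+1).
import Mathlib
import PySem

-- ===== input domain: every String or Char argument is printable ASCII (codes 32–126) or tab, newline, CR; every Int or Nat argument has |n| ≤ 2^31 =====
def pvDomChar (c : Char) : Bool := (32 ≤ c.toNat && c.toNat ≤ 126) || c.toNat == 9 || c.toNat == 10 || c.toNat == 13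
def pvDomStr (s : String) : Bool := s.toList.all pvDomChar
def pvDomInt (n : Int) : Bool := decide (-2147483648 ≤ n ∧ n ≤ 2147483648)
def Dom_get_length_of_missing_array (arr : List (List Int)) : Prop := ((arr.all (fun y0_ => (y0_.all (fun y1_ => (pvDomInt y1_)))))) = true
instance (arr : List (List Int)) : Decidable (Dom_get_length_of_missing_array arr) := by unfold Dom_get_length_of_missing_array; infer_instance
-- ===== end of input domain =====

-- ===== PORT A =====
-- B replaces A's three scans over the lengths list and the materialised range-sum
-- by a single pass with the Gauss closed-form formula (objective: alternative).

-- the for-loop of A: collects len(x) for every x, 'none' = the early 'return 0' on an empty x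
def pvBuildLens : List (List Int) → Option (List Int)
  | [] => some []
  | x :: xs => if x = [] then none else (pvBuildLens xs).map (fun t => (x.length : Int) :: t)

def get_length_of_missing_array (arr : List (List Int)) : Int :=
  if arr = [] then 0
  else
    match pvBuildLens arr with
    | none => 0
    | some lista =>
      let maior := (PySem.List.max? lista (fun y => y)).getD 0
      let menor := (PySem.List.min? lista (fun y => y)).getD 0
      let s := (PySem.List.pyRange menor (maior + 1) 1).sum
      s - lista.sum

-- ===== PORT B =====
-- the loop body of B: running (lo, hi, total)
def pvStepB (s : Int × Int × Int) (x : List Int) : Int × Int × Int :=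
  let n : Int := x.length
  (if n < s.1 then n else s.1, if s.2.1 < n then n else s.2.1, s.2.2 + n)

def get_length_of_missing_array_alt (arr : List (List Int)) : Int :=
  if arr = [] ∨ arr.any (fun x => decide (x = [])) then 0
  else
    match arr with
    | [] => 0
    | x :: xs =>
      let n0 : Int := x.length
      let r := (x :: xs).foldl pvStepB (n0, n0, 0)
      PySem.Int.floordiv ((r.1 + r.2.1) * (r.2.1 - r.1 + 1)) 2 - r.2.2

-- ===== PRECONDITION & SPEC =====
def Spec_get_length_of_missing_array (arr : List (List Int)) (out : Int) : Prop := out = get_length_of_missing_array_alt arr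
instance (arr : List (List Int)) (out : Int) : Decidable (Spec_get_length_of_missing_array arr out) := by unfold Spec_get_length_of_missing_array; infer_instance

-- ===== CLAIM (what is proved, stated in full; the proofs are below) =====
def Claim_equal_get_length_of_missing_array : Prop := ∀ (arr : List (List Int)), Dom_get_length_of_missing_array arr → Spec_get_length_of_missing_array arr (get_length_of_missing_array arr)

-- ===== LEMMAS AND PROOFS =====

-- pvBuildLens returns none iff some element is empty
lemma pvBuildLens_eq_none_iff (arr : List (List Int)) :
    pvBuildLens arr = none ↔ [] ∈ arr := by
  induction arr with
  | nil => simp [pvBuildLens]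
  | cons x xs ih =>
    by_cases hx : x = []
    · subst hx; simp [pvBuildLens]
    · simp [pvBuildLens, hx, ih, Ne.symm hx]

lemma pvBuildLens_eq_some (arr : List (List Int)) (h : [] ∉ arr) :
    pvBuildLens arr = some (arr.map (fun x => (x.length : Int))) := by
  induction arr with
  | nil => simp [pvBuildLens]
  | cons x xs ih =>
    simp only [List.mem_cons, not_or] at h
    simp [pvBuildLens, Ne.symm h.1, ih h.2]

-- B's fold computes (running min, running max, running sum)
lemma pvFold_eq (ys : List (List Int)) (a b c : Int) :
    ys.foldl pvStepB (a, b, c) =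
      ((ys.map (fun x => (x.length : Int))).foldl min a,
       (ys.map (fun x => (x.length : Int))).foldl max b,
       c + (ys.map (fun x => (x.length : Int))).sum) := by
  induction ys generalizing a b c with
  | nil => simp
  | cons y ys ih =>
    simp only [List.foldl_cons, List.map_cons, List.sum_cons, pvStepB, ih]
    congr 1
    · by_cases h : ((y.length : Int)) < a
      · simp [h, le_of_lt h]
      · rw [if_neg h, min_eq_left (by omega)]
    congr 1
    · by_cases h : b < ((y.length : Int))
      · rw [if_pos h, max_eq_right (le_of_lt h)]
      · rw [if_neg h, max_eq_left (by omega)]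
    · ring_nf

-- running min/max are below/above every element
lemma pvFoldMin_le (l : List Int) (a : Int) : l.foldl min a ≤ a ∧ ∀ y ∈ l, l.foldl min a ≤ y := by
  induction l generalizing a with
  | nil => simp
  | cons x t ih =>
    have h := ih (min a x)
    refine ⟨le_trans h.1 (min_le_left _ _), ?_⟩
    intro y hy
    rcases List.mem_cons.mp hy with rfl | hy
    · exact le_trans h.1 (min_le_right _ _)
    · exact h.2 y hy

lemma pvFoldMax_ge (l : List Int) (a : Int) : a ≤ l.foldl max a ∧ ∀ y ∈ l, y ≤ l.foldl max a := by
  induction l generalizing a with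
  | nil => simp
  | cons x t ih =>
    have h := ih (max a x)
    refine ⟨le_trans (le_max_left _ _) h.1, ?_⟩
    intro y hy
    rcases List.mem_cons.mp hy with rfl | hy
    · exact le_trans (le_max_right _ _) h.1
    · exact h.2 y hy

-- Gauss: twice the sum of range(a, b) is (b - a) * (a + b - 1)
lemma pvGauss (a b : Int) (h : a ≤ b) :
    (PySem.List.pyRange a b 1).sum * 2 = (b - a) * (a + b - 1) := by
  have hn : b = a + ((b - a).toNat : Int) := by omega
  obtain ⟨n, hn'⟩ : ∃ n : Nat, b = a + n := ⟨(b - a).toNat, hn⟩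
  subst hn'
  clear h hn
  induction n generalizing a with
  | zero => simp [PySem.List.pyRange_one_eq_nil]
  | succ k ih =>
    rw [PySem.List.pyRange_one_cons (by omega)]
    have := ih (a + 1)
    push_cast at this ⊢
    simp only [List.sum_cons]
    have h2 : a + 1 + (k : Int) = a + ((k : Int) + 1) := by ring
    rw [h2] at this
    nlinarith [this]

-- ===== VERDICT (by name: the statement is the Claim_ definition above) =====
theorem get_length_of_missing_array_spec : Claim_equal_get_length_of_missing_array := by
  intro arr _
  unfold Spec_get_length_of_missing_array get_length_of_missing_array get_length_of_missing_array_alt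
  by_cases hnil : arr = []
  · simp [hnil]
  by_cases hmem : [] ∈ arr
  · have hany : arr.any (fun x => decide (x = [])) = true := by
      rw [List.any_eq_true]; exact ⟨[], hmem, by simp⟩
    rw [if_neg hnil, (pvBuildLens_eq_none_iff arr).mpr hmem, if_pos (Or.inr hany)]
  · have hany : arr.any (fun x => decide (x = [])) = false := by
      rw [List.any_eq_false]; intro y hy; simp only [decide_eq_true_eq]
      intro h; exact hmem (h ▸ hy)
    rw [if_neg hnil, pvBuildLens_eq_some arr hmem, if_neg (by simp [hnil, hany])]
    obtain ⟨x, xs, rfl⟩ := List.exists_cons_of_ne_nil hnil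
    dsimp only
    rw [pvFold_eq]
    simp only [List.map_cons, List.foldl_cons, min_self, max_self, zero_add, List.sum_cons]
    set t := xs.map (fun u => ((u.length : Int))) with ht
    set lo := t.foldl min (x.length : Int) with hlo
    set hi := t.foldl max (x.length : Int) with hhi
    have hmax : PySem.List.max? ((x.length : Int) :: t) (fun y => y) = some hi :=
      PySem.List.max?_id_cons _ _
    have hmin : PySem.List.min? ((x.length : Int) :: t) (fun y => y) = some lo :=
      PySem.List.min?_id_cons _ _
    rw [hmax, hmin]
    simp only [Option.getD_some]
    have hle : lo ≤ hi := le_trans (pvFoldMin_le _ _).1 (pvFoldMax_ge _ _).1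
    have hg := pvGauss lo (hi + 1) (by omega)
    have hfd : PySem.Int.floordiv ((lo + hi) * (hi - lo + 1)) 2
        = (PySem.List.pyRange lo (hi + 1) 1).sum := by
      have h2 : (lo + hi) * (hi - lo + 1) = (PySem.List.pyRange lo (hi + 1) 1).sum * 2 := by
        rw [hg]; ring
      rw [PySem.Int.floordiv_eq_ediv_of_pos (by omega), h2]
      omega
    rw [hfd]
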